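-- pv_equiv track=rewrite | github.com/Ibtissam0320/Exposed_by_Design | experiments/attack2_featuresstudy.py | bfs_layers_undirected
-- ===== SOURCE A (Python) =====
-- def bfs_layers_undirected(start, neighbors, max_hop=3):
--     start = str(start)
--     layers = {}
--     seen = {start}
--     frontier = {start}
--
--     for i in range(1, max_hop + 1):
--         next_layer = set()
--         for u in frontier:
--             for v in neighbors.get(str(u), set()):
--                 v = str(v)
--                 if v not in seen:
--                     seen.add(v)
--                     next_layer.add(v)
--         layers[i] = next_layer
--         frontier = next_layer
--         if not frontier:
--             break
--     return layers
-- ===== SOURCE B (Python) =====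
-- from collections import deque
--
-- def bfs_layers_undirected(start, neighbors, max_hop=3):
--     start = str(start)
--     dist = {start: 0}
--     queue = deque([start])
--     while queue:
--         u = queue.popleft()
--         if dist[u] >= max_hop:
--             break
--         for v in neighbors.get(u, ()):
--             v = str(v)
--             if v not in dist:
--                 dist[v] = dist[u] + 1
--                 queue.append(v)
--     layers = {}
--     d = 1
--     while d <= max_hop:
--         layer = {n for n, dd in dist.items() if dd == d}
--         layers[d] = layer
--         if not layer:
--             break
--         d += 1
--     return layers
-- ===== Notes on version B (the rewrite author's own statement) =====
-- stated objective: alternative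
-- what changed: Replaces A's per-level frontier-set expansion (nested loops rebuilding a next_layer set each round) by a single FIFO-queue BFS that records a distance for every reached node, followed by a grouping pass that emits each distance class until an empty one ends the output.
import Mathlib
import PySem

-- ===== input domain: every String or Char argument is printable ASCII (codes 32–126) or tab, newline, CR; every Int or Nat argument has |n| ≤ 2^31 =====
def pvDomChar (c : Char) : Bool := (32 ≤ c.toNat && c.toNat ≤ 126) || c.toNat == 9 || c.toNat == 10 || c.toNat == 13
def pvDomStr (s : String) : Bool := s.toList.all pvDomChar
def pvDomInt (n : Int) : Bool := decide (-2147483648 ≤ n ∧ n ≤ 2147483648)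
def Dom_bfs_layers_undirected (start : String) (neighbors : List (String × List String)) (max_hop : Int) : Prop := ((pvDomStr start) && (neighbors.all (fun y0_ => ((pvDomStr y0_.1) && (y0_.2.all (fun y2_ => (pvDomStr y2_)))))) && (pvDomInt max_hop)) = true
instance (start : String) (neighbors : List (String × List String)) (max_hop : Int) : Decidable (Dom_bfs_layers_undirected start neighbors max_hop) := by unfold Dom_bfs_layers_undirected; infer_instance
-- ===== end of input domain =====

-- B replaces A's per-level frontier-set loop by one FIFO-queue BFS recording distances,
-- then groups nodes by distance (objective: alternative decomposition, same cost).

-- ===== PORT A =====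
-- str(x) applied to a value that is already a str is the identity, so the str() coercions
-- of A are omitted; Python set iteration is ported as insertion-order iteration (the
-- returned dict-of-sets values are order-insensitive as sets).

-- the body of A's inner 'for v in neighbors.get(...)' loop; state = (seen, next_layer)
def pvAdd2 (acc : PySem.Set String × PySem.Set String) (v : String) :
    PySem.Set String × PySem.Set String :=
  if PySem.Set.contains acc.1 v then acc else (PySem.Set.add acc.1 v, PySem.Set.add acc.2 v)

-- the body of A's 'for u in frontier' loop
def pvStep (neighbors : List (String × List String))
    (acc : PySem.Set String × PySem.Set String) (u : String) :
    PySem.Set String × PySem.Set String :=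
  ((PySem.Dict.mk neighbors).getD u []).foldl pvAdd2 acc

-- A's 'for i in range(1, max_hop+1)' loop with its break; fuel = remaining range length
def pvALoop (neighbors : List (String × List String)) :
    Nat → Int → PySem.Dict Int (List String) → PySem.Set String → PySem.Set String →
    PySem.Dict Int (List String)
  | 0, _, layers, _, _ => layers
  | n + 1, i, layers, seen, frontier =>
    let p := frontier.foldl (pvStep neighbors) (seen, PySem.Set.empty)
    let layers' := layers.insert i p.2
    if p.2.isEmpty then layers' else pvALoop neighbors n (i + 1) layers' p.1 p.2

def bfs_layers_undirected (start : String) (neighbors : List (String × List String))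
    (max_hop : Int) : List (Int × List String) :=
  (pvALoop neighbors max_hop.toNat 1 (PySem.Dict.mk [])
    (PySem.Set.ofList [start]) (PySem.Set.ofList [start])).items

-- ===== PORT B =====

-- the body of B's inner 'for v in neighbors.get(u, ())' loop; state = (dist, queue)
def pvBAdd (w : Int) (acc : PySem.Dict String Int × List String) (v : String) :
    PySem.Dict String Int × List String :=
  if acc.1.contains v then acc else (acc.1.insert v w, acc.2 ++ [v])

-- fuel bound for the 'while queue' loop: every popped node is a distinct key of dist,
-- so at most 1 + (total number of neighbor-list entries) iterations ever happen
def pvBFuel (neighbors : List (String × List String)) : Nat :=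
  1 + neighbors.foldl (fun a p => a + p.2.length) 0

def pvBExpand (neighbors : List (String × List String)) (max_hop : Int) :
    Nat → List String → PySem.Dict String Int → PySem.Dict String Int
  | _, [], dist => dist
  | 0, _ :: _, dist => dist      -- fuel guard only; unreachable when started with pvBFuel
  | f + 1, u :: q, dist =>
    -- u is always a key of dist (queue invariant), so dist[u] never raises and the
    -- getD default is never read
    let du := (dist.get? u).getD 0
    if max_hop ≤ du then dist    -- the 'break' of B's while loop
    else
      let s := ((PySem.Dict.mk neighbors).getD u []).foldl (pvBAdd (du + 1)) (dist, q)
      pvBExpand neighbors max_hop f s.2 s.1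

-- B's 'while d <= max_hop' grouping loop with its break; the fuel counts the remaining
-- values of d with d ≤ max_hop, so fuel = 0 is exactly the loop condition going false
def pvBGroup (items : List (String × Int)) :
    Nat → Int → PySem.Dict Int (List String) → PySem.Dict Int (List String)
  | 0, _, layers => layers
  | n + 1, d, layers =>
    let layer : PySem.Set String :=
      PySem.Set.ofList ((items.filter (fun p => p.2 == d)).map Prod.fst)
    let layers' := layers.insert d layer
    if layer.isEmpty then layers' else pvBGroup items n (d + 1) layers'

def bfs_layers_undirected_alt (start : String) (neighbors : List (String × List String))
    (max_hop : Int) : List (Int × List String) :=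
  let dist := pvBExpand neighbors max_hop (pvBFuel neighbors) [start]
    (PySem.Dict.mk [(start, 0)])
  (pvBGroup dist.items max_hop.toNat 1 (PySem.Dict.mk [])).items

-- ===== PRECONDITION & SPEC =====
def Spec_bfs_layers_undirected (start : String) (neighbors : List (String × List String)) (max_hop : Int) (out : List (Int × List String)) : Prop := out = bfs_layers_undirected_alt start neighbors max_hop
instance (start : String) (neighbors : List (String × List String)) (max_hop : Int) (out : List (Int × List String)) : Decidable (Spec_bfs_layers_undirected start neighbors max_hop out) := by unfold Spec_bfs_layers_undirected; infer_instance

-- ===== CLAIM (what is proved, stated in full; the proofs are below) =====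
def Claim_equal_bfs_layers_undirected : Prop := ∀ (start : String) (neighbors : List (String × List String)) (max_hop : Int), Dom_bfs_layers_undirected start neighbors max_hop → Spec_bfs_layers_undirected start neighbors max_hop (bfs_layers_undirected start neighbors max_hop)

-- ===== LEMMAS AND PROOFS =====

-- ghost trace of A's layered loop: the list of layers A records (the last one may be empty)
def pvGhost (neighbors : List (String × List String)) :
    Nat → PySem.Set String → PySem.Set String → List (List String)
  | 0, _, _ => []
  | n + 1, seen, frontier =>
    let p := frontier.foldl (pvStep neighbors) (seen, PySem.Set.empty)
    p.2 :: (if p.2.isEmpty then [] else pvGhost neighbors n p.1 p.2)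

-- the items of B's dist map beyond start: layer j listed with value i + j
def pvBlocks : Int → List (List String) → List (String × Int)
  | _, [] => []
  | i, L :: t => L.map (fun x => (x, i)) ++ pvBlocks (i + 1) t

-- A's layers dict as items: keys i, i+1, ... paired with the recorded layers
def pvEnum : Int → List (List String) → List (Int × List String)
  | _, [] => []
  | i, L :: t => (i, L) :: pvEnum (i + 1) t

-- total neighbor-list length over a list of nodes
def pvNS (neighbors : List (String × List String)) (us : List String) : Nat :=
  (us.map (fun u => ((PySem.Dict.mk neighbors).getD u []).length)).sum

lemma pv_inner (nbrs : List (String × List String)) (w : Int) :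
    ∀ (vs : List String) (seen next : PySem.Set String) (dist : PySem.Dict String Int)
      (q : List String),
      dist.keys = seen → seen.Nodup → (∀ x ∈ next, x ∈ seen) →
      ∃ delta : List String,
        vs.foldl pvAdd2 (seen, next) = (seen ++ delta, next ++ delta) ∧
        (seen ++ delta).Nodup ∧ (∀ x ∈ delta, x ∉ seen) ∧ delta.length ≤ vs.length ∧
        (vs.foldl (pvBAdd w) (dist, q)).1.items = dist.items ++ delta.map (fun x => (x, w)) ∧
        (vs.foldl (pvBAdd w) (dist, q)).2 = q ++ delta := by
  intro vs
  induction vs with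
  | nil =>
    intro seen next dist q hk hnd hsub
    exact ⟨[], by simp, by simpa using hnd, by simp, by simp, by simp, by simp⟩
  | cons v vs ih =>
    intro seen next dist q hk hnd hsub
    by_cases hv : v ∈ seen
    · have hA : pvAdd2 (seen, next) v = (seen, next) := by
        simp [pvAdd2]
        intro h
        exact absurd hv h
      have hBc : dist.contains v = true := by
        rw [PySem.Dict.contains_eq_decide_mem_keys, hk]; simp [hv]
      have hB : pvBAdd w (dist, q) v = (dist, q) := by simp [pvBAdd, hBc]
      obtain ⟨delta, e1, e2, e3, e4, e5, e6⟩ := ih seen next dist q hk hnd hsub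
      refine ⟨delta, ?_, e2, e3, ?_, ?_, ?_⟩
      · rw [List.foldl_cons, hA]; exact e1
      · simp only [List.length_cons]; omega
      · rw [List.foldl_cons, hB]; exact e5
      · rw [List.foldl_cons, hB]; exact e6
    · have hvn : v ∉ next := fun h => hv (hsub v h)
      have hA : pvAdd2 (seen, next) v = (seen ++ [v], next ++ [v]) := by
        simp [pvAdd2, PySem.Set.add_of_not_mem hv, PySem.Set.add_of_not_mem hvn]
        exact hv
      have hBc : dist.contains v = false := by
        rw [PySem.Dict.contains_eq_decide_mem_keys, hk]; simp [hv]
      have hB : pvBAdd w (dist, q) v = (dist.insert v w, q ++ [v]) := by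
        simp [pvBAdd, hBc]
      have hk' : (dist.insert v w).keys = seen ++ [v] := by
        rw [PySem.Dict.keys_insert_of_not_contains _ _ hBc, hk]
      have hnd' : (seen ++ [v]).Nodup := by
        simp [List.nodup_append, hnd]
        intro x hx e; exact hv (e ▸ hx)
      have hsub' : ∀ x ∈ next ++ [v], x ∈ seen ++ [v] := by
        intro x hx
        rcases List.mem_append.1 hx with h | h
        · exact List.mem_append.2 (Or.inl (hsub x h))
        · exact List.mem_append.2 (Or.inr h)
      obtain ⟨delta, e1, e2, e3, e4, e5, e6⟩ :=
        ih (seen ++ [v]) (next ++ [v]) (dist.insert v w) (q ++ [v]) hk' hnd' hsub'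
      refine ⟨v :: delta, ?_, ?_, ?_, ?_, ?_, ?_⟩
      · simpa only [List.foldl_cons, hA, List.append_assoc, List.singleton_append] using e1
      · simpa only [List.append_assoc, List.singleton_append] using e2
      · intro x hx
        rcases List.mem_cons.1 hx with rfl | hx
        · exact hv
        · intro hxs; exact e3 x hx (List.mem_append.2 (Or.inl hxs))
      · simp only [List.length_cons]; omega
      · rw [List.foldl_cons, hB, e5, PySem.Dict.items_insert_of_not_contains _ _ hBc]
        simp
      · rw [List.foldl_cons, hB, e6]; simp

lemma pv_run (nbrs : List (String × List String)) (max_hop dd : Int) :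
    ∀ (fr pend : List String) (seen next : PySem.Set String) (dist : PySem.Dict String Int),
      dist.keys = seen → seen.Nodup → (∀ x ∈ next, x ∈ seen) →
      (∀ u ∈ fr, dist.get? u = some dd) → dd < max_hop →
      ∃ (delta : List String) (D' : PySem.Dict String Int),
        fr.foldl (pvStep nbrs) (seen, next) = (seen ++ delta, next ++ delta) ∧
        (seen ++ delta).Nodup ∧ (∀ x ∈ delta, x ∉ seen) ∧ delta.length ≤ pvNS nbrs fr ∧
        D'.items = dist.items ++ delta.map (fun x => (x, dd + 1)) ∧
        (∀ f, pvBExpand nbrs max_hop (f + fr.length) (fr ++ pend) dist =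
              pvBExpand nbrs max_hop f (pend ++ delta) D') := by
  intro fr
  induction fr with
  | nil =>
    intro pend seen next dist hk hnd hsub hfr hdd
    exact ⟨[], dist, by simp, by simpa using hnd, by simp, by simp [pvNS],
      by simp, fun f => by simp⟩
  | cons u fr ih =>
    intro pend seen next dist hk hnd hsub hfr hdd
    have hndk : dist.keys.Nodup := by rw [hk]; exact hnd
    have hu : dist.get? u = some dd := hfr u (by simp)
    obtain ⟨d1, a1, a2, a3, a4, b5, b6⟩ :=
      pv_inner nbrs (dd + 1) ((PySem.Dict.mk nbrs).getD u []) seen next dist (fr ++ pend)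
        hk hnd hsub
    have hk1 : (((PySem.Dict.mk nbrs).getD u []).foldl (pvBAdd (dd + 1))
        (dist, fr ++ pend)).1.keys = seen ++ d1 := by
      have h0 : (((PySem.Dict.mk nbrs).getD u []).foldl (pvBAdd (dd + 1))
          (dist, fr ++ pend)).1.keys = (((PySem.Dict.mk nbrs).getD u []).foldl (pvBAdd (dd + 1))
          (dist, fr ++ pend)).1.items.map (fun p => p.1) := rfl
      have h1 : dist.items.map (fun p => p.1) = dist.keys := rfl
      rw [h0, b5, List.map_append, List.map_map, h1, hk]
      simp [Function.comp_def]
    have hnd1 : (((PySem.Dict.mk nbrs).getD u []).foldl (pvBAdd (dd + 1))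
        (dist, fr ++ pend)).1.keys.Nodup := by rw [hk1]; exact a2
    have hget1 : ∀ x w', dist.get? x = some w' →
        (((PySem.Dict.mk nbrs).getD u []).foldl (pvBAdd (dd + 1))
          (dist, fr ++ pend)).1.get? x = some w' := by
      intro x w' hx
      have hm : (x, w') ∈ dist.items :=
        (PySem.Dict.get?_eq_some_iff_mem_items dist x w' hndk).1 hx
      refine (PySem.Dict.get?_eq_some_iff_mem_items _ x w' hnd1).2 ?_
      rw [b5]; exact List.mem_append.2 (Or.inl hm)
    obtain ⟨d2, D2, c1, c2, c3, c4, c5, c6⟩ :=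
      ih (pend ++ d1) (seen ++ d1) (next ++ d1)
        (((PySem.Dict.mk nbrs).getD u []).foldl (pvBAdd (dd + 1)) (dist, fr ++ pend)).1
        hk1 a2
        (by intro x hx
            rcases List.mem_append.1 hx with h | h
            · exact List.mem_append.2 (Or.inl (hsub x h))
            · exact List.mem_append.2 (Or.inr h))
        (fun u' hu' => hget1 u' dd (hfr u' (List.mem_cons_of_mem _ hu')))
        hdd
    refine ⟨d1 ++ d2, D2, ?_, ?_, ?_, ?_, ?_, ?_⟩
    · rw [List.foldl_cons]
      have hstep : pvStep nbrs (seen, next) u = (seen ++ d1, next ++ d1) := by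
        simpa [pvStep] using a1
      rw [hstep, c1]
      simp [List.append_assoc]
    · simpa [List.append_assoc] using c2
    · intro x hx
      rcases List.mem_append.1 hx with hx | hx
      · exact a3 x hx
      · intro hxs; exact c3 x hx (List.mem_append.2 (Or.inl hxs))
    · have hNS : pvNS nbrs (u :: fr) =
          ((PySem.Dict.mk nbrs).getD u []).length + pvNS nbrs fr := by simp [pvNS]
      rw [hNS]
      simp only [List.length_append]
      omega
    · rw [c5, b5]
      simp [List.append_assoc]
    · intro f
      have hlen : f + (u :: fr).length = (f + fr.length) + 1 := by
        simp [List.length_cons]; omega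
      rw [hlen]
      have hstep1 : pvBExpand nbrs max_hop ((f + fr.length) + 1) ((u :: fr) ++ pend) dist =
          pvBExpand nbrs max_hop (f + fr.length)
            (((PySem.Dict.mk nbrs).getD u []).foldl (pvBAdd (dd + 1)) (dist, fr ++ pend)).2
            (((PySem.Dict.mk nbrs).getD u []).foldl (pvBAdd (dd + 1)) (dist, fr ++ pend)).1 := by
        show pvBExpand nbrs max_hop ((f + fr.length) + 1) (u :: (fr ++ pend)) dist = _
        simp only [pvBExpand, hu, Option.getD_some]
        rw [if_neg (not_le.2 hdd)]
      rw [hstep1, b6]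
      have hq : (fr ++ pend) ++ d1 = fr ++ (pend ++ d1) := by simp
      rw [hq, c6 f]
      simp [List.append_assoc]

lemma pv_main (nbrs : List (String × List String)) (max_hop : Int) :
    ∀ (n : Nat) (i : Int) (seen fr : PySem.Set String) (dist : PySem.Dict String Int),
      dist.keys = seen → seen.Nodup → (∀ u ∈ fr, dist.get? u = some (i - 1)) →
      1 ≤ i → i + n = max_hop + 1 →
      ∃ D' : PySem.Dict String Int,
        D'.items = dist.items ++ pvBlocks i (pvGhost nbrs n seen fr) ∧
        (∀ f, pvBExpand nbrs max_hop
            (f + (fr.length + (pvGhost nbrs n seen fr).flatten.length)) fr dist = D') := by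
  intro n
  induction n with
  | zero =>
    intro i seen fr dist hk hnd hfr h1 hsum
    refine ⟨dist, by simp [pvGhost, pvBlocks], ?_⟩
    intro f
    simp only [pvGhost, List.flatten_nil, List.length_nil]
    cases fr with
    | nil =>
      have hnil : ∀ g, pvBExpand nbrs max_hop g [] dist = dist := by
        intro g; cases g <;> rfl
      exact hnil _
    | cons u rest =>
      have hu : dist.get? u = some (i - 1) := hfr u (by simp)
      have hmax : max_hop ≤ i - 1 := by omega
      have hlen : f + ((u :: rest).length + 0) = (f + rest.length) + 1 := by
        simp [List.length_cons]; omega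
      rw [hlen]
      show pvBExpand nbrs max_hop ((f + rest.length) + 1) (u :: rest) dist = dist
      simp only [pvBExpand, hu, Option.getD_some]
      rw [if_pos hmax]
  | succ n IH =>
    intro i seen fr dist hk hnd hfr h1 hsum
    obtain ⟨d1, D1, r1, r2, r3, r4, r5, r6⟩ :=
      pv_run nbrs max_hop (i - 1) fr [] seen [] dist hk hnd (by simp) hfr (by omega)
    have hi : i - 1 + 1 = i := by omega
    rw [hi] at r5
    have hfold : fr.foldl (pvStep nbrs) (seen, PySem.Set.empty) = (seen ++ d1, d1) := by
      simpa using r1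
    by_cases hd1 : d1 = []
    · have hgh2 : pvGhost nbrs (n + 1) seen fr = [[]] := by
        simp only [pvGhost, hfold]
        simp [hd1]
      refine ⟨D1, ?_, ?_⟩
      · rw [hgh2, r5, hd1]
        simp [pvBlocks]
      · intro f
        rw [hgh2]
        have h6 := r6 f
        rw [hd1] at h6
        simp only [List.append_nil] at h6
        have hD : ∀ g, pvBExpand nbrs max_hop g [] D1 = D1 := by
          intro g; cases g <;> rfl
        simpa [hD] using h6
    · have hgh2 : pvGhost nbrs (n + 1) seen fr = d1 :: pvGhost nbrs n (seen ++ d1) d1 := by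
        simp only [pvGhost, hfold]
        simp [hd1]
      have hkD : D1.keys = seen ++ d1 := by
        have h0 : D1.keys = D1.items.map (fun p => p.1) := rfl
        have h1' : dist.items.map (fun p => p.1) = dist.keys := rfl
        rw [h0, r5, List.map_append, List.map_map, h1', hk]
        simp [Function.comp_def]
      have hndD : D1.keys.Nodup := by rw [hkD]; exact r2
      have hfrD : ∀ u ∈ d1, D1.get? u = some ((i + 1) - 1) := by
        intro u hu
        have hm : (u, i) ∈ D1.items := by
          rw [r5]
          exact List.mem_append.2 (Or.inr (List.mem_map.2 ⟨u, hu, rfl⟩))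
        have := (PySem.Dict.get?_eq_some_iff_mem_items D1 u i hndD).2 hm
        simpa using this
      obtain ⟨D2, m1, m2⟩ := IH (i + 1) (seen ++ d1) d1 D1 hkD r2 hfrD (by omega) (by omega)
      refine ⟨D2, ?_, ?_⟩
      · rw [hgh2, m1, r5, pvBlocks]
        simp [List.append_assoc]
      · intro f
        rw [hgh2]
        have hfuel : f + (fr.length +
            (d1 :: pvGhost nbrs n (seen ++ d1) d1).flatten.length) =
            (f + (d1.length + (pvGhost nbrs n (seen ++ d1) d1).flatten.length)) +
              fr.length := by
          simp only [List.flatten_cons, List.length_append]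
          omega
        rw [hfuel]
        have h6 := r6 (f + (d1.length + (pvGhost nbrs n (seen ++ d1) d1).flatten.length))
        simp only [List.append_nil, List.nil_append] at h6
        rw [h6]
        exact m2 f

lemma pv_stepA (nbrs : List (String × List String)) (fr : List String)
    (seen next : PySem.Set String) (hnd : seen.Nodup) (hsub : ∀ x ∈ next, x ∈ seen)
    (hfr : ∀ u ∈ fr, u ∈ seen) :
    ∃ delta : List String,
      fr.foldl (pvStep nbrs) (seen, next) = (seen ++ delta, next ++ delta) ∧
      (seen ++ delta).Nodup ∧ (∀ x ∈ delta, x ∉ seen) ∧ delta.length ≤ pvNS nbrs fr := by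
  have hk : (PySem.Dict.mk (seen.map (fun x => (x, (0 : Int))))).keys = seen := by
    have h0 : (PySem.Dict.mk (seen.map (fun x => (x, (0 : Int))))).keys =
        (seen.map (fun x => (x, (0 : Int)))).map (fun p => p.1) := rfl
    rw [h0, List.map_map]; simp [Function.comp_def]
  have hndk : (PySem.Dict.mk (seen.map (fun x => (x, (0 : Int))))).keys.Nodup := by
    rw [hk]; exact hnd
  have hget : ∀ u ∈ fr, (PySem.Dict.mk (seen.map (fun x => (x, (0 : Int))))).get? u =
      some 0 := by
    intro u hu
    refine (PySem.Dict.get?_eq_some_iff_mem_items _ u 0 hndk).2 ?_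
    show (u, (0 : Int)) ∈ seen.map (fun x => (x, (0 : Int)))
    exact List.mem_map.2 ⟨u, hfr u hu, rfl⟩
  obtain ⟨delta, _, a1, a2, a3, a4, _, _⟩ :=
    pv_run nbrs 1 0 fr [] seen next (PySem.Dict.mk (seen.map (fun x => (x, (0 : Int)))))
      hk hnd hsub hget (by norm_num)
  exact ⟨delta, a1, a2, a3, a4⟩

lemma pv_NS_append (nbrs : List (String × List String)) (a b : List String) :
    pvNS nbrs (a ++ b) = pvNS nbrs a + pvNS nbrs b := by
  simp [pvNS]

lemma pv_ghost_facts (nbrs : List (String × List String)) :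
    ∀ (n : Nat) (seen fr : PySem.Set String), seen.Nodup → (∀ u ∈ fr, u ∈ seen) →
      (∀ L ∈ pvGhost nbrs n seen fr, L.Nodup) ∧
      (∀ L ∈ (pvGhost nbrs n seen fr).dropLast, L ≠ []) ∧
      ((pvGhost nbrs n seen fr).length = n ∨ (pvGhost nbrs n seen fr).getLast? = some []) ∧
      (pvGhost nbrs n seen fr).length ≤ n ∧
      (seen ++ (pvGhost nbrs n seen fr).flatten).Nodup ∧
      (pvGhost nbrs n seen fr).flatten.length ≤
        pvNS nbrs fr + pvNS nbrs (pvGhost nbrs n seen fr).flatten := by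
  intro n
  induction n with
  | zero =>
    intro seen fr hnd hfr
    refine ⟨by simp [pvGhost], by simp [pvGhost], Or.inl (by simp [pvGhost]),
      by simp [pvGhost], ?_, by simp [pvGhost, pvNS]⟩
    simpa [pvGhost] using hnd
  | succ n IH =>
    intro seen fr hnd hfr
    obtain ⟨d1, s1, s2, s3, s4⟩ := pv_stepA nbrs fr seen PySem.Set.empty hnd (by simp) hfr
    have hfold : fr.foldl (pvStep nbrs) (seen, PySem.Set.empty) = (seen ++ d1, d1) := by
      simpa using s1
    have hd1nd : d1.Nodup := (List.nodup_append.1 s2).2.1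
    by_cases hd1 : d1 = []
    · have hgh2 : pvGhost nbrs (n + 1) seen fr = [[]] := by
        simp only [pvGhost, hfold]
        simp [hd1]
      rw [hgh2]
      refine ⟨?_, ?_, Or.inr rfl, ?_, ?_, ?_⟩
      · intro L hL; rw [List.mem_singleton.1 hL]; exact List.nodup_nil
      · intro L hL; simp at hL
      · rw [show ([[]] : List (List String)).length = 1 from rfl]; omega
      · simpa using hnd
      · simp
    · have hgh2 : pvGhost nbrs (n + 1) seen fr = d1 :: pvGhost nbrs n (seen ++ d1) d1 := by
        simp only [pvGhost, hfold]
        simp [hd1]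
      rw [hgh2]
      have hsub' : ∀ u ∈ d1, u ∈ seen ++ d1 := fun u hu => List.mem_append.2 (Or.inr hu)
      obtain ⟨g1, g2, g3, g4, g5, g6⟩ := IH (seen ++ d1) d1 s2 hsub'
      refine ⟨?_, ?_, ?_, ?_, ?_, ?_⟩
      · intro L hL
        rcases List.mem_cons.1 hL with rfl | hL
        · exact hd1nd
        · exact g1 L hL
      · intro L hL
        by_cases hrest : pvGhost nbrs n (seen ++ d1) d1 = []
        · rw [hrest] at hL; simp at hL
        · rw [List.dropLast_cons_of_ne_nil hrest] at hL
          rcases List.mem_cons.1 hL with rfl | hL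
          · exact hd1
          · exact g2 L hL
      · rcases g3 with h | h
        · exact Or.inl (by simp [h])
        · refine Or.inr ?_
          have hrne : pvGhost nbrs n (seen ++ d1) d1 ≠ [] := by
            intro he; rw [he] at h; simp at h
          cases hrest : pvGhost nbrs n (seen ++ d1) d1 with
          | nil => exact absurd hrest hrne
          | cons r rs =>
            rw [hrest] at h
            rw [List.getLast?_cons_cons]
            exact h
      · simp only [List.length_cons]
        omega
      · rw [List.flatten_cons, ← List.append_assoc]
        exact g5
      · rw [List.flatten_cons, pv_NS_append]
        simp only [List.length_append]
        omega

lemma pv_NS_le (nbrs : List (String × List String)) :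
    ∀ us : List String, us.Nodup → pvNS nbrs us ≤ (nbrs.map (fun p => p.2.length)).sum := by
  induction nbrs with
  | nil =>
    intro us h
    have h0 : ∀ u : String,
        (PySem.Dict.mk ([] : List (String × List String))).getD u [] = [] := fun _ => rfl
    simp [pvNS, h0]
  | cons p rest ihr =>
    obtain ⟨k, vs⟩ := p
    intro us hnd
    have hcons : ∀ u, (PySem.Dict.mk ((k, vs) :: rest)).getD u [] =
        if k == u then vs else (PySem.Dict.mk rest).getD u [] := by
      intro u
      simp only [PySem.Dict.getD_eq_get?_getD, PySem.Dict.get?_mk_cons]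
      split <;> rfl
    have inner : ∀ us : List String, us.Nodup →
        (us.map (fun u => ((PySem.Dict.mk ((k, vs) :: rest)).getD u []).length)).sum ≤
        vs.length + ((us.filter (fun u => !(u == k))).map
          (fun u => ((PySem.Dict.mk rest).getD u []).length)).sum := by
      intro us
      induction us with
      | nil => simp
      | cons u t iht =>
        intro hnd'
        have h1 : u ∉ t := (List.nodup_cons.1 hnd').1
        have h2 : t.Nodup := (List.nodup_cons.1 hnd').2
        by_cases hke : u = k
        · subst hke
          have htail : ∀ x ∈ t, ((PySem.Dict.mk ((u, vs) :: rest)).getD x []).length =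
              ((PySem.Dict.mk rest).getD x []).length := by
            intro x hx
            rw [hcons x, if_neg]
            intro e
            exact h1 ((beq_iff_eq.1 e) ▸ hx)
          have hmapeq : (t.map (fun x =>
              ((PySem.Dict.mk ((u, vs) :: rest)).getD x []).length)).sum =
              (t.map (fun x => ((PySem.Dict.mk rest).getD x []).length)).sum := by
            congr 1
            exact List.map_congr_left htail
          have hf : t.filter (fun x => !(x == u)) = t := by
            refine List.filter_eq_self.2 ?_
            intro x hx
            simp only [Bool.not_eq_eq_eq_not, Bool.not_true, beq_eq_false_iff_ne, ne_eq]
            exact fun e => h1 (e ▸ hx)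
          rw [List.map_cons, List.sum_cons, hcons u, if_pos (by simp), hmapeq]
          have hfc : (u :: t).filter (fun x => !(x == u)) = t := by
            rw [List.filter_cons]
            simp [hf]
          rw [hfc]
        · have hcond : (u == k) = false := beq_eq_false_iff_ne.2 hke
          have hcond2 : (k == u) = false := beq_eq_false_iff_ne.2 (fun e => hke e.symm)
          rw [List.map_cons, List.sum_cons, hcons u, if_neg (by simp [hcond2])]
          have hfc : (u :: t).filter (fun x => !(x == k)) =
              u :: t.filter (fun x => !(x == k)) := by
            rw [List.filter_cons]
            simp [hcond]
          rw [hfc, List.map_cons, List.sum_cons]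
          have iht2 := iht h2
          omega
    have houter := inner us hnd
    have hrest := ihr (us.filter (fun u => !(u == k))) (hnd.filter _)
    have hNS : pvNS ((k, vs) :: rest) us =
        (us.map (fun u => ((PySem.Dict.mk ((k, vs) :: rest)).getD u []).length)).sum := rfl
    have hNS2 : pvNS rest (us.filter (fun u => !(u == k))) =
        ((us.filter (fun u => !(u == k))).map
          (fun u => ((PySem.Dict.mk rest).getD u []).length)).sum := rfl
    rw [hNS]
    simp only [List.map_cons, List.sum_cons]
    rw [hNS2] at hrest
    omega

lemma pv_ALoop_items (nbrs : List (String × List String)) :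
    ∀ (n : Nat) (i : Int) (layers : PySem.Dict Int (List String))
      (seen fr : PySem.Set String),
      (∀ k ∈ layers.keys, k < i) →
      (pvALoop nbrs n i layers seen fr).items =
        layers.items ++ pvEnum i (pvGhost nbrs n seen fr) := by
  intro n
  induction n with
  | zero =>
    intro i layers seen fr h
    simp [pvALoop, pvGhost, pvEnum]
  | succ n IH =>
    intro i layers seen fr h
    have hci : layers.contains i = false := by
      rw [PySem.Dict.contains_eq_decide_mem_keys]
      simp only [decide_eq_false_iff_not]
      intro hm
      exact lt_irrefl i (h i hm)
    have hitems := PySem.Dict.items_insert_of_not_contains layers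
      (fr.foldl (pvStep nbrs) (seen, PySem.Set.empty)).2 hci
    have hkeys := PySem.Dict.keys_insert_of_not_contains layers
      (fr.foldl (pvStep nbrs) (seen, PySem.Set.empty)).2 hci
    simp only [pvALoop, pvGhost]
    by_cases hE : (fr.foldl (pvStep nbrs) (seen, PySem.Set.empty)).2.isEmpty = true
    · rw [if_pos hE, if_pos hE, hitems]
      simp [pvEnum]
    · rw [if_neg hE, if_neg hE]
      have hlt : ∀ k ∈ (layers.insert i
          (fr.foldl (pvStep nbrs) (seen, PySem.Set.empty)).2).keys, k < i + 1 := by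
        intro k hk
        rw [hkeys] at hk
        rcases List.mem_append.1 hk with hk | hk
        · exact lt_trans (h k hk) (by omega)
        · rw [List.mem_singleton.1 hk]; omega
      rw [IH (i + 1) (layers.insert i (fr.foldl (pvStep nbrs) (seen, PySem.Set.empty)).2)
        (fr.foldl (pvStep nbrs) (seen, PySem.Set.empty)).1
        (fr.foldl (pvStep nbrs) (seen, PySem.Set.empty)).2 hlt]
      rw [hitems]
      simp [pvEnum, List.append_assoc]

lemma pv_blocks_filter_lt : ∀ (t : List (List String)) (i e : Int), e < i →
    (pvBlocks i t).filter (fun p => p.2 == e) = [] := by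
  intro t
  induction t with
  | nil => intro i e h; simp [pvBlocks]
  | cons L t ih =>
    intro i e h
    rw [pvBlocks, List.filter_append, ih (i + 1) e (by omega)]
    simp only [List.append_nil]
    refine List.filter_eq_nil_iff.2 ?_
    intro p hp
    obtain ⟨x, _, rfl⟩ := List.mem_map.1 hp
    simp only [beq_iff_eq]
    omega

lemma pv_blocks_filter : ∀ (t : List (List String)) (i e : Int), i ≤ e →
    ((pvBlocks i t).filter (fun p => p.2 == e)).map Prod.fst =
      t.getD (e - i).toNat [] := by
  intro t
  induction t with
  | nil => intro i e h; simp [pvBlocks]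
  | cons L t ih =>
    intro i e h
    rw [pvBlocks, List.filter_append]
    by_cases he : e = i
    · subst he
      rw [pv_blocks_filter_lt t (e + 1) e (by omega)]
      have hfl : (L.map (fun x => (x, e))).filter (fun p => p.2 == e) =
          L.map (fun x => (x, e)) := by
        refine List.filter_eq_self.2 ?_
        intro p hp
        obtain ⟨x, _, rfl⟩ := List.mem_map.1 hp
        simp
      rw [hfl]
      simp [Function.comp_def]
    · have hie : i < e := lt_of_le_of_ne h (fun x => he x.symm)
      have hfl : (L.map (fun x => (x, i))).filter (fun p => p.2 == e) = [] := by
        refine List.filter_eq_nil_iff.2 ?_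
        intro p hp
        obtain ⟨x, _, rfl⟩ := List.mem_map.1 hp
        simp only [beq_iff_eq]
        omega
      rw [hfl, List.nil_append, ih (i + 1) e (by omega)]
      have ht : (e - i).toNat = (e - (i + 1)).toNat + 1 := by omega
      rw [ht]
      simp

lemma pv_group (itemsF : List (String × Int)) :
    ∀ (t : List (List String)) (n : Nat) (d : Int)
      (layers : PySem.Dict Int (List String)),
      1 ≤ d →
      (∀ e : Int, d ≤ e →
        ((itemsF.filter (fun p => p.2 == e)).map Prod.fst) = t.getD (e - d).toNat []) →
      (∀ L ∈ t, L.Nodup) →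
      (∀ L ∈ t.dropLast, L ≠ []) →
      (t.length = n ∨ t.getLast? = some []) →
      t.length ≤ n →
      (∀ k ∈ layers.keys, k < d) →
      (pvBGroup itemsF n d layers).items = layers.items ++ pvEnum d t := by
  intro t
  induction t with
  | nil =>
    intro n d layers h1 hfilter hnodup hdrop hshape hle hkeys
    rcases hshape with h | h
    · rw [← h]
      simp [pvBGroup, pvEnum]
    · simp at h
  | cons L t iht =>
    intro n d layers h1 hfilter hnodup hdrop hshape hle hkeys
    obtain ⟨m, rfl⟩ : ∃ m, n = m + 1 := by
      cases n with
      | zero => simp at hle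
      | succ m => exact ⟨m, rfl⟩
    have hlayer : PySem.Set.ofList ((itemsF.filter (fun p => p.2 == d)).map Prod.fst) = L := by
      have hf := hfilter d (le_refl d)
      simp only [sub_self, Int.toNat_zero, List.getD_cons_zero] at hf
      rw [hf]
      exact PySem.Set.ofList_eq_self_of_nodup _ (hnodup L (by simp))
    have hci : layers.contains d = false := by
      rw [PySem.Dict.contains_eq_decide_mem_keys]
      simp only [decide_eq_false_iff_not]
      intro hm
      exact lt_irrefl d (hkeys d hm)
    have hitems := PySem.Dict.items_insert_of_not_contains layers
      (PySem.Set.ofList ((itemsF.filter (fun p => p.2 == d)).map Prod.fst)) hci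
    have hkeys' := PySem.Dict.keys_insert_of_not_contains layers
      (PySem.Set.ofList ((itemsF.filter (fun p => p.2 == d)).map Prod.fst)) hci
    simp only [pvBGroup]
    by_cases hL : L = []
    · have ht : t = [] := by
        by_contra htne
        have hmem : L ∈ (L :: t).dropLast := by
          rw [List.dropLast_cons_of_ne_nil htne]
          simp
        exact hdrop L hmem hL
      subst ht
      have hEmp : (PySem.Set.ofList
          ((itemsF.filter (fun p => p.2 == d)).map Prod.fst)).isEmpty = true := by
        rw [hlayer, hL]
        rfl
      rw [if_pos hEmp, hitems, hlayer, hL]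
      simp [pvEnum]
    · have hEmp : (PySem.Set.ofList
          ((itemsF.filter (fun p => p.2 == d)).map Prod.fst)).isEmpty = false := by
        rw [hlayer]
        simpa using hL
      rw [if_neg (by simp [hEmp])]
      have hfil : ∀ e : Int, d + 1 ≤ e →
          ((itemsF.filter (fun p => p.2 == e)).map Prod.fst) =
            t.getD (e - (d + 1)).toNat [] := by
        intro e he
        have hf := hfilter e (by omega)
        have ht : (e - d).toNat = (e - (d + 1)).toNat + 1 := by omega
        rw [ht, List.getD_cons_succ] at hf
        exact hf
      have hnd2 : ∀ M ∈ t, M.Nodup := fun M hM => hnodup M (List.mem_cons_of_mem _ hM)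
      have hdp2 : ∀ M ∈ t.dropLast, M ≠ [] := by
        intro M hM
        refine hdrop M ?_
        by_cases htne : t = []
        · rw [htne] at hM; simp at hM
        · rw [List.dropLast_cons_of_ne_nil htne]
          exact List.mem_cons_of_mem _ hM
      have hsh2 : t.length = m ∨ t.getLast? = some [] := by
        rcases hshape with h | h
        · left; simp at h; omega
        · right
          cases t with
          | nil => simp at h; exact absurd h hL
          | cons r rs =>
            rw [List.getLast?_cons_cons] at h
            exact h
      have hl2 : t.length ≤ m := by
        simp at hle
        omega
      have hk2 : ∀ k ∈ (layers.insert d (PySem.Set.ofList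
          ((itemsF.filter (fun p => p.2 == d)).map Prod.fst))).keys, k < d + 1 := by
        intro k hk
        rw [hkeys'] at hk
        rcases List.mem_append.1 hk with hk | hk
        · exact lt_trans (hkeys k hk) (by omega)
        · rw [List.mem_singleton.1 hk]; omega
      rw [iht m (d + 1) _ (by omega) hfil hnd2 hdp2 hsh2 hl2 hk2]
      rw [hitems, hlayer]
      simp [pvEnum, List.append_assoc]

lemma pv_final (start : String) (nbrs : List (String × List String)) (mh : Int) :
    bfs_layers_undirected start nbrs mh = bfs_layers_undirected_alt start nbrs mh := by
  by_cases h0 : mh ≤ 0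
  · have ht : mh.toNat = 0 := Int.toNat_of_nonpos h0
    unfold bfs_layers_undirected bfs_layers_undirected_alt
    rw [ht]
    rfl
  · push_neg at h0
    have hn : (mh.toNat : Int) = mh := Int.toNat_of_nonneg (by omega)
    -- ghost facts at the initial state
    have hnd0 : ([start] : List String).Nodup := by simp
    obtain ⟨g1, g2, g3, g4, g5, g6⟩ :=
      pv_ghost_facts nbrs mh.toNat [start] [start] hnd0 (by simp)
    -- A's result
    have hA : bfs_layers_undirected start nbrs mh =
        pvEnum 1 (pvGhost nbrs mh.toNat [start] [start]) := by
      unfold bfs_layers_undirected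
      have hset : PySem.Set.ofList [start] = [start] := rfl
      rw [hset]
      rw [pv_ALoop_items nbrs mh.toNat 1 (PySem.Dict.mk []) [start] [start]
        (by intro k hk; simp [PySem.Dict.keys] at hk)]
      rfl
    -- B's dist map
    have hget0 : ∀ u ∈ ([start] : List String),
        (PySem.Dict.mk [(start, (0 : Int))]).get? u = some (1 - 1) := by
      intro u hu
      rw [List.mem_singleton.1 hu]
      rw [PySem.Dict.get?_mk_cons]
      simp
    obtain ⟨D', m1, m2⟩ :=
      pv_main nbrs mh mh.toNat 1 [start] [start] (PySem.Dict.mk [(start, (0 : Int))])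
        (by rfl) hnd0 hget0 (by omega) (by omega)
    -- fuel is sufficient
    have hused : 1 + (pvGhost nbrs mh.toNat [start] [start]).flatten.length ≤ pvBFuel nbrs := by
      have hNS1 : pvNS nbrs ([start] ++ (pvGhost nbrs mh.toNat [start] [start]).flatten) ≤
          (nbrs.map (fun p => p.2.length)).sum := pv_NS_le nbrs _ g5
      rw [pv_NS_append] at hNS1
      have hsum : nbrs.foldl (fun a p => a + p.2.length) 0 =
          (nbrs.map (fun p => p.2.length)).sum := by
        simp [List.sum_eq_foldl, List.foldl_map]
      unfold pvBFuel
      rw [hsum]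
      omega
    have hrun : pvBExpand nbrs mh (pvBFuel nbrs) [start] (PySem.Dict.mk [(start, (0 : Int))]) =
        D' := by
      have hf : pvBFuel nbrs =
          (pvBFuel nbrs - (1 + (pvGhost nbrs mh.toNat [start] [start]).flatten.length)) +
          (([start] : List String).length +
            (pvGhost nbrs mh.toNat [start] [start]).flatten.length) := by
        simp only [List.length_singleton]
        omega
      rw [hf]
      exact m2 _
    have hitems : D'.items = (start, (0 : Int)) ::
        pvBlocks 1 (pvGhost nbrs mh.toNat [start] [start]) := by
      rw [m1]; rfl
    -- grouping
    have hfilter : ∀ e : Int, 1 ≤ e →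
        ((D'.items.filter (fun p => p.2 == e)).map Prod.fst) =
        (pvGhost nbrs mh.toNat [start] [start]).getD (e - 1).toNat [] := by
      intro e he
      rw [hitems, List.filter_cons]
      have hc : ((start, (0 : Int)).2 == e) = false := by
        simp only [beq_eq_false_iff_ne, ne_eq]
        omega
      rw [hc]
      simp only [Bool.false_eq_true, if_neg]
      exact pv_blocks_filter (pvGhost nbrs mh.toNat [start] [start]) 1 e he
    have hBgroup := pv_group D'.items
      (pvGhost nbrs mh.toNat [start] [start]) mh.toNat 1 (PySem.Dict.mk [])
      (by omega) hfilter g1 g2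
      (by rcases g3 with h | h
          · exact Or.inl h
          · exact Or.inr h)
      g4
      (by intro k hk; simp [PySem.Dict.keys] at hk)
    rw [hA]
    unfold bfs_layers_undirected_alt
    rw [hrun, hBgroup]
    rfl

-- ===== VERDICT (by name: the statement is the Claim_ definition above) =====
theorem bfs_layers_undirected_spec : Claim_equal_bfs_layers_undirected := by
  intro start neighbors max_hop _
  unfold Spec_bfs_layers_undirected
  exact pv_final start neighbors max_hop
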